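-- pv_equiv track=rewrite | github.com/Albislan/coh_piah | teste3.py | conta_caracteres_frase
-- ===== SOURCE A (Python) =====
-- def conta_caracteres_frase(texto):
--      caracteres = []
--      for caracter in texto:
--           total = 0
--           if caracter == "." or caracter == ",":
--                del(caracter)
--           else:
--                caracteres.extend(caracter)
--      return len(caracteres)
-- ===== SOURCE B (Python) =====
-- def conta_caracteres_frase(texto):
--     return len(texto) - texto.count(".") - texto.count(",")
-- ===== Notes on version B (the rewrite author's own statement) =====
-- stated objective: idiomatic
-- what changed: Replaces the filtering loop that builds a list of kept characters with len(texto) minus the counts of '.' and ',' (total-minus-counts, no intermediate list; the Python-level per-character loop disappears into C-level len/count calls).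
import Mathlib
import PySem

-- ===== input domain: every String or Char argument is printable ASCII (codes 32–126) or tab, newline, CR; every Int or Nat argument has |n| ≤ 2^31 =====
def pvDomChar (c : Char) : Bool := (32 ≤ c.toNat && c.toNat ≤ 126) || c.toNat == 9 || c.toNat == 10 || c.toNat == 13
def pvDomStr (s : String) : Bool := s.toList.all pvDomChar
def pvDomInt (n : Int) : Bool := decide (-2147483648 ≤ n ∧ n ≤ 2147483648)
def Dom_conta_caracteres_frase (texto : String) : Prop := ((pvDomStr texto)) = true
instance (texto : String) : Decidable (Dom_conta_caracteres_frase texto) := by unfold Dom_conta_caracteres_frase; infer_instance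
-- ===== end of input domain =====

-- B replaces A's filtering loop by len(texto) - count('.') - count(',') (idiomatic total-minus-counts).

-- ===== PORT A =====
-- literal port: build the list 'caracteres' by appending each kept character, return its length
def conta_caracteres_frase (texto : String) : Int :=
  let caracteres : List Char :=
    texto.toList.foldl (fun acc caracter =>
      if caracter = '.' ∨ caracter = ',' then acc else acc ++ [caracter]) []
  PySem.List.len caracteres

-- ===== PORT B =====
def conta_caracteres_frase_alt (texto : String) : Int :=
  PySem.Str.len texto - (PySem.Str.count texto "." : Int) - (PySem.Str.count texto "," : Int)

-- ===== PRECONDITION & SPEC =====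
def Spec_conta_caracteres_frase (texto : String) (out : Int) : Prop := out = conta_caracteres_frase_alt texto
instance (texto : String) (out : Int) : Decidable (Spec_conta_caracteres_frase texto out) := by unfold Spec_conta_caracteres_frase; infer_instance

-- ===== CLAIM (what is proved, stated in full; the proofs are below) =====
def Claim_equal_conta_caracteres_frase : Prop := ∀ (texto : String), Dom_conta_caracteres_frase texto → Spec_conta_caracteres_frase texto (conta_caracteres_frase texto)

-- ===== LEMMAS AND PROOFS =====

-- Chars.count with a single-character needle is List.count
theorem pv_go_single (c : Char) : ∀ (l : List Char) (fuel acc : ℕ), l.length ≤ fuel →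
    PySem.Chars.count.go [c] fuel l acc = acc + l.count c := by
  intro l
  induction l with
  | nil => intro fuel acc _; cases fuel <;> simp [PySem.Chars.count.go]
  | cons h t ih =>
    intro fuel acc hle
    cases fuel with
    | zero => simp at hle
    | succ n =>
      simp only [PySem.Chars.count.go]
      by_cases hc : h = c
      · simp [List.isPrefixOf, hc, ih n (acc + 1) (by simpa using hle)]
        omega
      · simp [List.isPrefixOf, hc, ih n acc (by simpa using hle), Ne.symm hc]

theorem pv_count_single (cs : List Char) (c : Char) : PySem.Chars.count cs [c] = cs.count c := by
  simp [PySem.Chars.count, pv_go_single c cs cs.length 0 le_rfl]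

-- A's loop builds a list whose length is the count of kept characters
theorem pv_foldl_len (l acc : List Char) :
    (l.foldl (fun acc caracter =>
      if caracter = '.' ∨ caracter = ',' then acc else acc ++ [caracter]) acc).length
      = acc.length + l.countP (fun c => !(c = '.' ∨ c = ',')) := by
  induction l generalizing acc with
  | nil => simp
  | cons h t ih =>
    by_cases hc : h = '.' ∨ h = ','
    · rcases hc with hc | hc <;> simp [List.foldl_cons, hc, ih]
    · push Not at hc
      simp [List.foldl_cons, hc.1, hc.2, ih]
      omega

theorem pv_partition (l : List Char) :
    l.countP (fun c => !(c = '.' ∨ c = ',')) + l.count '.' + l.count ',' = l.length := by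
  induction l with
  | nil => simp
  | cons h t ih =>
    simp only [List.countP_cons, List.count_cons, List.length_cons]
    by_cases h1 : h = '.' <;> by_cases h2 : h = ',' <;>
      simp_all <;> omega

-- ===== VERDICT (by name: the statement is the Claim_ definition above) =====
theorem conta_caracteres_frase_spec : Claim_equal_conta_caracteres_frase := by
  intro texto _
  unfold Spec_conta_caracteres_frase conta_caracteres_frase conta_caracteres_frase_alt
  simp only [PySem.List.len, PySem.Str.count, PySem.Str.len, pv_foldl_len]
  rw [show ("." : String).toList = ['.'] from rfl, show ("," : String).toList = [','] from rfl]
  rw [pv_count_single, pv_count_single]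
  have := pv_partition texto.toList
  simp only [List.length_nil, Nat.zero_add]
  omega
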